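-- pv_equiv track=rewrite | github.com/akshat98/unittesting | src/unittesting/playing_board.py | get_playing_board
-- ===== SOURCE A (Python) =====
-- def get_playing_board(n: int)-> list[str]:
--     def get_char(ind : int)-> str:
--         return ' ' if ind%2 == 0 else '*'
--
--     ind=0
--     matrix = []
--     for j in range(n):
--         row = ""
--         for i in range(n):
--             row+= get_char(ind)
--             ind+=1
--         matrix.append(row)
--     return matrix
-- ===== SOURCE B (Python) =====
-- def get_playing_board(n: int) -> list[str]:
--     m = max(n, 0)
--     s = ''.join(' ' if k % 2 == 0 else '*' for k in range(m * m))
--     return [s[j * m:(j + 1) * m] for j in range(m)]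
-- ===== Notes on version B (the rewrite author's own statement) =====
-- stated objective: simpler
-- what changed: Replaces the stateful running counter with nested string accumulation by one flat generation of all n*n characters (parity of the global index) joined once, then sliced into n rows.
import Mathlib
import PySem

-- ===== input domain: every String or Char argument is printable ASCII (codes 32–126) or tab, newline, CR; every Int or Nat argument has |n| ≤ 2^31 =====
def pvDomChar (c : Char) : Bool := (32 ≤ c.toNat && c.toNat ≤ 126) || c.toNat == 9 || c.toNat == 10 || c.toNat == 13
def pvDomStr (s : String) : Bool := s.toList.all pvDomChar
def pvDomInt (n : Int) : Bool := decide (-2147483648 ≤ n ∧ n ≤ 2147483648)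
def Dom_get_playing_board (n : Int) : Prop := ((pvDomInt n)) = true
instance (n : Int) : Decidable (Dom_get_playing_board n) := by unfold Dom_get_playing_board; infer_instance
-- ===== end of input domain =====

-- B builds one flat character sequence (parity of the flat index) and slices it into rows,
-- replacing A's running counter with nested accumulation; objective: simpler decomposition.

-- ===== PORT A =====
-- Python's nested `get_char`; rows are built as List Char and frozen with String.ofList
-- (exact for `row += get_char(ind)` since only single chars are appended).
def pvGetChar (ind : Int) : Char := if PySem.Int.mod ind 2 == 0 then ' ' else '*'

def get_playing_board (n : Int) : List String :=
  let st := (PySem.List.pyRange 0 n 1).foldl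
    (fun (st : Int × List String) _j =>
      let row := (PySem.List.pyRange 0 n 1).foldl
        (fun (r : List Char × Int) _i => (r.1 ++ [pvGetChar r.2], r.2 + 1))
        ([], st.1)
      (row.2, st.2 ++ [String.ofList row.1]))
    (0, [])
  st.2

-- ===== PORT B =====
def get_playing_board_alt (n : Int) : List String :=
  let m : Int := max n 0
  let s : List Char :=
    (PySem.List.pyRange 0 (m * m) 1).map
      (fun k => if PySem.Int.mod k 2 == 0 then ' ' else '*')
  (PySem.List.pyRange 0 m 1).map
    (fun j => String.ofList (PySem.List.slice s (some (j * m)) (some ((j + 1) * m))))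

-- ===== PRECONDITION & SPEC =====
def Spec_get_playing_board (n : Int) (out : List String) : Prop := out = get_playing_board_alt n
instance (n : Int) (out : List String) : Decidable (Spec_get_playing_board n out) := by unfold Spec_get_playing_board; infer_instance

-- ===== CLAIM (what is proved, stated in full; the proofs are below) =====
def Claim_equal_get_playing_board : Prop := ∀ (n : Int), Dom_get_playing_board n → Spec_get_playing_board n (get_playing_board n)

-- ===== LEMMAS AND PROOFS =====

-- the common normal form: row j, cell i holds pvGetChar (j*m + i)
def pvBoard (m : Nat) : List String :=
  (List.range m).map (fun j =>
    String.ofList ((List.range m).map (fun i => pvGetChar ((j * m + i : Nat) : Int))))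

def pvStep (m : Nat) (st : Int × List String) (_j : Int) : Int × List String :=
  (st.1 + m, st.2 ++ [String.ofList ((List.range m).map
    (fun (i : Nat) => pvGetChar (st.1 + (i : Int))))])

theorem pv_inner (l : List Int) (r : List Char) (ind : Int) :
    l.foldl (fun (p : List Char × Int) _i => (p.1 ++ [pvGetChar p.2], p.2 + 1)) (r, ind)
      = (r ++ (List.range l.length).map (fun (i : Nat) => pvGetChar (ind + (i : Int))),
         ind + l.length) := by
  induction l generalizing r ind with
  | nil => simp
  | cons x t ih =>
    rw [List.foldl_cons, ih]
    simp only [List.length_cons, List.range_succ_eq_map, List.map_cons, List.map_map,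
      Prod.mk.injEq, List.append_assoc, List.singleton_append]
    refine ⟨?_, by push_cast; ring⟩
    congr 1
    congr 1
    · norm_num
    · apply List.map_congr_left
      intro i _
      simp only [Function.comp_apply]
      congr 1
      push_cast; ring

theorem pv_step_eq (n : Int) (m : Nat) (hm : (PySem.List.pyRange 0 n 1).length = m) :
    (fun (st : Int × List String) (_j : Int) =>
      let row := (PySem.List.pyRange 0 n 1).foldl
        (fun (r : List Char × Int) _i => (r.1 ++ [pvGetChar r.2], r.2 + 1))
        ([], st.1)
      (row.2, st.2 ++ [String.ofList row.1])) = pvStep m := by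
  funext st j
  simp only [pv_inner, hm, pvStep, List.nil_append]

theorem pv_outer (m : Nat) (l : List Int) (ind : Int) (matrix : List String) :
    (l.foldl (pvStep m) (ind, matrix)).2
      = matrix ++ (List.range l.length).map (fun (j : Nat) =>
          String.ofList ((List.range m).map
            (fun (i : Nat) => pvGetChar (ind + (j : Int) * m + (i : Int))))) := by
  induction l generalizing ind matrix with
  | nil => simp
  | cons x t ih =>
    rw [List.foldl_cons]
    show ((t.foldl (pvStep m) (pvStep m (ind, matrix) x))).2 = _
    rw [pvStep, ih]
    simp only [List.length_cons, List.range_succ_eq_map, List.map_cons, List.map_map,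
      List.append_assoc, List.singleton_append]
    congr 2
    · congr 1
      apply List.map_congr_left
      intro i _
      congr 1
      push_cast; ring
    · apply List.map_congr_left
      intro j _
      simp only [Function.comp_apply]
      congr 1
      apply List.map_congr_left
      intro i _
      congr 1
      push_cast [Nat.succ_eq_add_one]; ring

theorem pv_A_eq (n : Int) : get_playing_board n = pvBoard (n.toNat) := by
  unfold get_playing_board pvBoard
  rw [pv_step_eq n n.toNat (by rw [PySem.List.length_pyRange_one]; omega), pv_outer]
  rw [PySem.List.pyRange_one, Int.sub_zero]
  simp only [List.length_map, List.length_range, List.nil_append]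
  apply List.map_congr_left
  intro j _
  congr 1
  apply List.map_congr_left
  intro i _
  congr 1
  push_cast; ring

theorem pv_B_eq (n : Int) : get_playing_board_alt n = pvBoard (n.toNat) := by
  unfold get_playing_board_alt pvBoard
  dsimp only
  by_cases hn : n ≤ 0
  · have hmax : max n 0 = 0 := by omega
    rw [hmax, PySem.List.pyRange_one_eq_nil le_rfl]
    have h0 : n.toNat = 0 := Int.toNat_of_nonpos hn
    simp [h0]
  · have hn' : 0 < n := by omega
    have hmax : max n 0 = n := by omega
    rw [hmax]
    have hm : n = (n.toNat : Int) := (Int.toNat_of_nonneg hn'.le).symm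
    set m := n.toNat with hmdef
    have hnn : (n * n - 0).toNat = m * m := by
      rw [hm, Int.sub_zero, ← Nat.cast_mul, Int.toNat_natCast]
    have hn0 : (n - 0).toNat = m := by rw [Int.sub_zero]
    rw [PySem.List.pyRange_one 0 (n * n), PySem.List.pyRange_one 0 n, hnn, hn0, List.map_map]
    apply List.map_congr_left
    intro j hj
    rw [List.mem_range] at hj
    simp only [Function.comp]
    congr 1
    have hb1 : ((0 : Int) + j) * n = ((j * m : Nat) : Int) := by
      rw [hm]; push_cast; ring
    have hb2 : (((0 : Int) + j) + 1) * n = ((j * m + m : Nat) : Int) := by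
      rw [hm]; push_cast; ring
    rw [hb1, hb2, PySem.List.slice_natCast]
    apply List.ext_getElem
    · have hlen : j * m + m ≤ m * m := by nlinarith
      simp only [List.length_take, List.length_drop, List.length_map, List.length_range]
      omega
    · intro i h1 h2
      have hi : i < m := by
        simp only [List.length_map, List.length_range] at h2; exact h2
      have hidx : j * m + i < m * m := by nlinarith
      simp only [List.getElem_take, List.getElem_drop, List.getElem_map, List.getElem_range]
      congr 1
      push_cast; ring

-- ===== VERDICT (by name: the statement is the Claim_ definition above) =====
theorem get_playing_board_spec : Claim_equal_get_playing_board := by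
  intro n _
  unfold Spec_get_playing_board
  rw [pv_A_eq, pv_B_eq]
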